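-- pv_equiv track=rewrite | github.com/zachcalvert/trw | bellybot/management/commands/generate_nicknames.py | pun_entry_point
-- ===== SOURCE A (Python) =====
-- def pun_entry_point(name, lookup, replacement):
--     i = name.find(lookup)
--     while i > 0:
--         if name[i - 1] in ['a', 'e', 'i', 'o', 'u', ' ']:
--             break
--         else:
--             i -= 1
--     return i
-- ===== SOURCE B (Python) =====
-- def pun_entry_point(name, lookup, replacement):
--     i = name.find(lookup)
--     if i <= 0:
--         return i
--     start = 0
--     for j in range(i):
--         if name[j] in 'aeiou ':
--             start = j + 1
--     return start
-- ===== Notes on version B (the rewrite author's own statement) =====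
-- stated objective: alternative
-- what changed: replaces A's backward while-loop with early break by a single forward pass over range(i) that tracks the rightmost vowel/space boundary left of the match in an accumulator
import Mathlib
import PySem

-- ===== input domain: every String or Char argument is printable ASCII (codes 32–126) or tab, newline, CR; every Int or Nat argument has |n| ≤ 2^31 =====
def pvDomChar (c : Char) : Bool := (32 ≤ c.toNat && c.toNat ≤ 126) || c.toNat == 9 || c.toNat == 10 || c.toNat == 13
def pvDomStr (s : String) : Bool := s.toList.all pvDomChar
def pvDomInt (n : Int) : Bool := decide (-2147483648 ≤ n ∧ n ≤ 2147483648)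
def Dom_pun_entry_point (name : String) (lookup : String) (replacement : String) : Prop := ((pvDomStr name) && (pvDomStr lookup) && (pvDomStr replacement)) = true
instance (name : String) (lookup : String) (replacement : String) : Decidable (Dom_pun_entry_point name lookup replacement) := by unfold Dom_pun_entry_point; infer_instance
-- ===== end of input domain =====

-- B replaces A's backward while-loop (early break at the first vowel/space) by a forward
-- accumulator pass over range(i); objective: alternative decomposition, same cost.

-- ===== PORT A =====
-- `name[i-1] in ['a','e','i','o','u',' ']`
def pvBoundaryA (c : Char) : Bool := decide (c ∈ ['a', 'e', 'i', 'o', 'u', ' '])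

-- the `while i > 0` loop of A, with i = n (n = 0 means the loop exited with i = 0);
-- the `none` branch is unreachable at the call site (i = name.find(lookup) ≤ len(name))
def pvALoop (cs : List Char) : Nat → Int
  | 0 => 0
  | n + 1 =>
    match PySem.List.pyGet? cs (n : Int) with
    | some c => if pvBoundaryA c then (n + 1 : Int) else pvALoop cs n
    | none => (n + 1 : Int)

def pun_entry_point (name : String) (lookup : String) (replacement : String) : Int :=
  let i := PySem.Str.find name lookup
  if 0 < i then pvALoop name.toList i.toNat else i

-- ===== PORT B =====
-- `name[j] in 'aeiou '`
def pvBoundaryB (c : Char) : Bool := decide (c ∈ "aeiou ".toList)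

def pun_entry_point_alt (name : String) (lookup : String) (replacement : String) : Int :=
  let i := PySem.Str.find name lookup
  if i ≤ 0 then i
  else
    (PySem.List.pyRange 0 i 1).foldl
      (fun start j =>
        match PySem.List.pyGet? name.toList j with
        | some c => if pvBoundaryB c then j + 1 else start
        | none => start)
      0

-- ===== PRECONDITION & SPEC =====
def Spec_pun_entry_point (name : String) (lookup : String) (replacement : String) (out : Int) : Prop := out = pun_entry_point_alt name lookup replacement
instance (name : String) (lookup : String) (replacement : String) (out : Int) : Decidable (Spec_pun_entry_point name lookup replacement out) := by unfold Spec_pun_entry_point; infer_instance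

-- ===== CLAIM (what is proved, stated in full; the proofs are below) =====
def Claim_equal_pun_entry_point : Prop := ∀ (name : String) (lookup : String) (replacement : String), Dom_pun_entry_point name lookup replacement → Spec_pun_entry_point name lookup replacement (pun_entry_point name lookup replacement)

-- ===== LEMMAS AND PROOFS =====

theorem pvBoundary_eq (c : Char) : pvBoundaryB c = pvBoundaryA c := by
  simp [pvBoundaryA, pvBoundaryB]

-- B's fold as a function of the loop bound
def pvBFold (cs : List Char) (n : Nat) : Int :=
  (PySem.List.pyRange 0 (n : Int) 1).foldl
    (fun start j =>
      match PySem.List.pyGet? cs j with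
      | some c => if pvBoundaryB c then j + 1 else start
      | none => start)
    0

theorem pvBFold_succ (cs : List Char) (n : Nat) :
    pvBFold cs (n + 1)
      = match PySem.List.pyGet? cs (n : Int) with
        | some c => if pvBoundaryB c then (n + 1 : Int) else pvBFold cs n
        | none => pvBFold cs n := by
  unfold pvBFold
  rw [show ((n + 1 : Nat) : Int) = (n : Int) + 1 by push_cast; ring,
    PySem.List.pyRange_one_succ_right (by exact_mod_cast Nat.zero_le n),
    List.foldl_append]
  simp only [List.foldl]

theorem pvALoop_eq_pvBFold (cs : List Char) (n : Nat) (hn : n ≤ cs.length) :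
    pvALoop cs n = pvBFold cs n := by
  induction n with
  | zero => simp [pvALoop, pvBFold]
  | succ m ih =>
    have hm : m < cs.length := hn
    have hget : PySem.List.pyGet? cs (m : Int) = some cs[m] := by
      simp [PySem.List.pyGet?_natCast, List.getElem?_eq_getElem hm]
    rw [pvBFold_succ]
    simp only [pvALoop, hget, pvBoundary_eq]
    split_ifs with h
    · rfl
    · exact ih (Nat.le_of_lt hm)

-- ===== VERDICT (by name: the statement is the Claim_ definition above) =====
theorem pun_entry_point_spec : Claim_equal_pun_entry_point := by
  intro name lookup replacement _
  unfold Spec_pun_entry_point pun_entry_point pun_entry_point_alt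
  simp only []
  set i := PySem.Str.find name lookup with hi
  by_cases h : 0 < i
  · rw [if_pos h, if_neg (by omega)]
    have hle : i ≤ (name.toList.length : Int) := by
      have := PySem.Chars.find_le_length name.toList lookup.toList
      simpa [hi, PySem.Str.find_eq] using this
    have hcast : ((i.toNat : Nat) : Int) = i := Int.toNat_of_nonneg (le_of_lt h)
    rw [pvALoop_eq_pvBFold name.toList i.toNat (by omega)]
    unfold pvBFold
    rw [hcast]
  · rw [if_neg h, if_pos (by omega)]
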